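-- pv_equiv track=rewrite | github.com/weqopy/short_codes | lintcode/49.sortLetters.py | sortLetters
-- ===== SOURCE A (Python) =====
-- def sortLetters(chars):
--     # write your code here
--     import string
--     lowercase = []
--     uppercase = []
--     for i in chars:
--         if i in string.ascii_lowercase:  # a-z
--             lowercase.append(i)
--         elif i in string.ascii_uppercase:  # A-Z
--             uppercase.append(i)
--     return ''.join(lowercase + uppercase)
-- ===== SOURCE B (Python) =====
-- def sortLetters(chars):
--     import string
--     letters = [c for c in chars
--                if c in string.ascii_lowercase or c in string.ascii_uppercase]
--     # stable sort: key False (lowercase) before key True (uppercase),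
--     # original order preserved within each group
--     return ''.join(sorted(letters, key=lambda c: c in string.ascii_uppercase))
-- ===== Notes on version B (the rewrite author's own statement) =====
-- stated objective: idiomatic
-- what changed: replaces the explicit two-bucket partition loop with a filter of the letters followed by a stable sort keyed on being uppercase
import Mathlib
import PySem

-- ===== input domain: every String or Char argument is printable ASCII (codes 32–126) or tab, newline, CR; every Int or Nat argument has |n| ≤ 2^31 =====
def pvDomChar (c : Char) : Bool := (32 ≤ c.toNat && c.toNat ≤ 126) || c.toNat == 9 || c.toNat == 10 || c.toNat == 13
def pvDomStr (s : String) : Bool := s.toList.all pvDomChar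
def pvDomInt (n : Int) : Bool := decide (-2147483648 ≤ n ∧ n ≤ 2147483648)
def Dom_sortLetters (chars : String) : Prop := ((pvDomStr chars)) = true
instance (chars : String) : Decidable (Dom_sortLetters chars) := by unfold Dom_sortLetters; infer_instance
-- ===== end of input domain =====

-- B replaces A's explicit two-bucket partition loop with filter-the-letters + stable sort
-- keyed on uppercase (objective: more idiomatic); proved to return the same string.


-- `c in string.ascii_lowercase` / `string.ascii_uppercase` for a single char: exact range tests
def pyLow (c : Char) : Bool := decide ('a' ≤ c ∧ c ≤ 'z')
def pyUp (c : Char) : Bool := decide ('A' ≤ c ∧ c ≤ 'Z')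

-- ===== PORT A =====
def sortLetters (chars : String) : String :=
  let st := chars.toList.foldl
    (fun (st : List Char × List Char) i =>
      if pyLow i then (st.1 ++ [i], st.2)
      else if pyUp i then (st.1, st.2 ++ [i])
      else st)
    ([], [])
  String.mk (st.1 ++ st.2)

-- ===== PORT B =====
-- Python's bool sort key False < True is ported as the Int key 0 < 1
def sortLetters_alt (chars : String) : String :=
  let letters := chars.toList.filter (fun c => pyLow c || pyUp c)
  String.mk (PySem.List.sorted letters (fun c => if pyUp c then (1 : Int) else 0))

-- ===== PRECONDITION & SPEC =====
def Spec_sortLetters (chars : String) (out : String) : Prop := out = sortLetters_alt chars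
instance (chars : String) (out : String) : Decidable (Spec_sortLetters chars out) := by unfold Spec_sortLetters; infer_instance

-- ===== CLAIM (what is proved, stated in full; the proofs are below) =====
def Claim_equal_sortLetters : Prop := ∀ (chars : String), Dom_sortLetters chars → Spec_sortLetters chars (sortLetters chars)

-- ===== LEMMAS AND PROOFS =====

theorem pyNotBoth (c : Char) : ¬ (pyLow c = true ∧ pyUp c = true) := by
  simp only [pyLow, pyUp, decide_eq_true_eq, Char.le_def, UInt32.le_iff_toNat_le]
  have h1 : ('a' : Char).val.toNat = 97 := rfl
  have h2 : ('z' : Char).val.toNat = 122 := rfl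
  have h3 : ('A' : Char).val.toNat = 65 := rfl
  have h4 : ('Z' : Char).val.toNat = 90 := rfl
  omega

theorem insertBy_mid (before : Char → Char → Bool) (x : Char) :
    ∀ (lo hi : List Char), (∀ y ∈ lo, before x y = false) → (∀ y ∈ hi, before x y = true) →
      PySem.List.insertBy before x (lo ++ hi) = lo ++ x :: hi := by
  intro lo
  induction lo with
  | nil =>
    intro hi _ hhi
    cases hi with
    | nil => simp [PySem.List.insertBy]
    | cons y ys => simp [PySem.List.insertBy, hhi y (by simp)]
  | cons z lo ih =>
    intro hi hlo hhi
    have hz : before x z = false := hlo z (by simp)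
    simp [PySem.List.insertBy, hz, ih hi (fun y hy => hlo y (by simp [hy])) hhi]

theorem foldB (key : Char → Int) :
    ∀ (l lo hi : List Char),
      (∀ y ∈ lo, key y = 0) → (∀ y ∈ hi, key y = 1) → (∀ x ∈ l, key x = 0 ∨ key x = 1) →
      l.foldl (fun acc x => PySem.List.insertBy (fun a b => decide (key a < key b)) x acc) (lo ++ hi)
        = (lo ++ l.filter (fun c => decide (key c = 0))) ++ (hi ++ l.filter (fun c => decide (key c = 1))) := by
  intro l
  induction l with
  | nil => intro lo hi _ _ _; simp
  | cons x l ih =>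
    intro lo hi hlo hhi hl
    rcases hl x (by simp) with hx | hx
    · have hins : PySem.List.insertBy (fun a b => decide (key a < key b)) x (lo ++ hi)
          = lo ++ x :: hi := by
        apply insertBy_mid
        · intro y hy; simp [hx, hlo y hy]
        · intro y hy; simp [hx, hhi y hy]
      have := ih (lo ++ [x]) hi
        (by intro y hy; rcases List.mem_append.1 hy with h | h
            · exact hlo y h
            · simp at h; simpa [h] using hx)
        hhi (fun y hy => hl y (by simp [hy]))
      simp only [List.foldl_cons, hins]
      have h2 : lo ++ x :: hi = (lo ++ [x]) ++ hi := by simp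
      rw [h2, this]
      simp [hx]
    · have hins : PySem.List.insertBy (fun a b => decide (key a < key b)) x (lo ++ hi)
          = (lo ++ hi) ++ [x] := by
        apply PySem.List.insertBy_of_forall_not_before
        intro y hy
        rcases List.mem_append.1 hy with h | h
        · simp [hx, hlo y h]
        · simp [hx, hhi y h]
      have := ih lo (hi ++ [x]) hlo
        (by intro y hy; rcases List.mem_append.1 hy with h | h
            · exact hhi y h
            · simp at h; simpa [h] using hx)
        (fun y hy => hl y (by simp [hy]))
      simp only [List.foldl_cons, hins, List.append_assoc] at this ⊢
      rw [this]
      simp [hx]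

theorem foldA :
    ∀ (l lo hi : List Char),
      l.foldl (fun (st : List Char × List Char) i =>
          if pyLow i then (st.1 ++ [i], st.2)
          else if pyUp i then (st.1, st.2 ++ [i])
          else st) (lo, hi)
        = (lo ++ l.filter pyLow, hi ++ l.filter (fun c => !pyLow c && pyUp c)) := by
  intro l
  induction l with
  | nil => intro lo hi; simp
  | cons x l ih =>
    intro lo hi
    by_cases hx : pyLow x = true
    · simp [List.foldl_cons, hx, ih]
    · by_cases hx2 : pyUp x = true
      · simp [List.foldl_cons, hx, hx2, ih]
      · simp [List.foldl_cons, hx, hx2, ih]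

theorem sortLetters_spec_aux (chars : String) :
    sortLetters chars = sortLetters_alt chars := by
  unfold sortLetters sortLetters_alt
  dsimp only
  rw [PySem.List.sorted_eq_foldl_insertBy]
  set l := chars.toList with hl
  set key : Char → Int := fun c => if pyUp c then (1 : Int) else 0 with hkey
  have hB := foldB key (l.filter (fun c => pyLow c || pyUp c)) [] []
    (by simp) (by simp)
    (by intro x _; by_cases h : pyUp x = true <;> simp [hkey, h])
  simp only [List.nil_append, List.append_nil] at hB
  rw [hB, foldA]
  simp only [List.nil_append]
  have hkey0 : ∀ c : Char, (decide (key c = 0)) = !pyUp c := by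
    intro c; by_cases h : pyUp c = true <;> simp [hkey, h]
  have hkey1 : ∀ c : Char, (decide (key c = 1)) = pyUp c := by
    intro c; by_cases h : pyUp c = true <;> simp [hkey, h]
  have e0 : (l.filter (fun c => pyLow c || pyUp c)).filter (fun c => decide (key c = 0))
      = l.filter pyLow := by
    rw [List.filter_filter]
    apply List.filter_congr
    intro c _
    rw [hkey0]
    by_cases h1 : pyLow c = true
    · have h2 : pyUp c = false := by
        by_contra h; have := pyNotBoth c; simp at h; exact this ⟨h1, h⟩
      simp [h1, h2]
    · by_cases h2 : pyUp c = true <;> simp [h1, h2]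
  have e1 : (l.filter (fun c => pyLow c || pyUp c)).filter (fun c => decide (key c = 1))
      = l.filter (fun c => !pyLow c && pyUp c) := by
    rw [List.filter_filter]
    apply List.filter_congr
    intro c _
    rw [hkey1]
    by_cases h2 : pyUp c = true
    · have h1 : pyLow c = false := by
        by_contra h; have := pyNotBoth c; simp at h; exact this ⟨h, h2⟩
      simp [h1, h2]
    · simp [h2]
  rw [e0, e1]

-- ===== VERDICT (by name: the statement is the Claim_ definition above) =====
theorem sortLetters_spec : Claim_equal_sortLetters := by
  intro chars _
  exact sortLetters_spec_aux chars
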